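-- pv_equiv track=rewrite | github.com/Vaibhavrathore1999/IAB-GZSL | utils.py | divide_into_groups
-- ===== SOURCE A (Python) =====
-- def divide_into_groups(n=512, k=20):
--     group = {}
--     nums_per_group = n // k
--     remainder = n % k
--
--     start_num = 0
--     for i in range(k):
--         if i < remainder:
--             end_num = start_num + nums_per_group + 1
--         else:
--             end_num = start_num + nums_per_group
--         group[i] = list(range(start_num, end_num))
--         start_num = end_num
--
--     return group
-- ===== SOURCE B (Python) =====
-- def divide_into_groups(n=512, k=20):
--     q = n // k
--     r = n % k
--     return {i: list(range(i * q + min(i, r),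
--                           i * q + min(i, r) + q + (1 if i < r else 0)))
--             for i in range(k)}
-- ===== Notes on version B (the rewrite author's own statement) =====
-- stated objective: alternative
-- what changed: Replaced the sequential start_num accumulator loop with a dict comprehension computing each group's bounds in closed form from its index (start = i*q + min(i, r)), so iterations are independent.
import Mathlib
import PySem

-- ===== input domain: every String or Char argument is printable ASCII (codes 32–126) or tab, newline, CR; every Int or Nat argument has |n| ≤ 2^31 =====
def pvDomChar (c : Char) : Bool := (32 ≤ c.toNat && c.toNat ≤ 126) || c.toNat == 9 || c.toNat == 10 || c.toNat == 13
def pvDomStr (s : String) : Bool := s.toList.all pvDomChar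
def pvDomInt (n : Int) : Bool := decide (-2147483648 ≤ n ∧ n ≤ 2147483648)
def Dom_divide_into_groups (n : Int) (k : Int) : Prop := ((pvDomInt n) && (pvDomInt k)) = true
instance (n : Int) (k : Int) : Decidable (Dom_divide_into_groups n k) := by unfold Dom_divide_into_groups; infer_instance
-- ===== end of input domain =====

-- B replaces A's running start_num accumulator by closed-form per-index bounds (start = i*q + min(i,r)): an alternative decomposition, same cost.

-- ===== PORT A =====
def divide_into_groups (n : Int) (k : Int) : List (Int × List Int) :=
  let q := PySem.Int.floordiv n k
  let r := PySem.Int.mod n k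
  let st := (PySem.List.pyRange 0 k 1).foldl
    (fun (st : PySem.Dict Int (List Int) × Int) i =>
      let e := if i < r then st.2 + q + 1 else st.2 + q
      (st.1.insert i (PySem.List.pyRange st.2 e 1), e))
    (PySem.Dict.empty, 0)
  st.1.items

-- ===== PORT B =====
def divide_into_groups_alt (n : Int) (k : Int) : List (Int × List Int) :=
  let q := PySem.Int.floordiv n k
  let r := PySem.Int.mod n k
  (PySem.List.pyRange 0 k 1).map (fun i =>
    let s := i * q + min i r
    (i, PySem.List.pyRange s (s + q + (if i < r then 1 else 0)) 1))

-- ===== PRECONDITION & SPEC =====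
-- Python A raises ZeroDivisionError at n // k when k = 0; Pre_ excludes exactly that.
def Pre_divide_into_groups (n : Int) (k : Int) : Prop := k ≠ 0
instance (n : Int) (k : Int) : Decidable (Pre_divide_into_groups n k) := by unfold Pre_divide_into_groups; infer_instance
def pvWitness_divide_into_groups : Int × Int := (7, 3)
def Spec_divide_into_groups (n : Int) (k : Int) (out : List (Int × List Int)) : Prop := out = divide_into_groups_alt n k
instance (n : Int) (k : Int) (out : List (Int × List Int)) : Decidable (Spec_divide_into_groups n k out) := by unfold Spec_divide_into_groups; infer_instance

-- ===== CLAIM (what is proved, stated in full; the proofs are below) =====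
def Claim_equal_divide_into_groups : Prop := ∀ (n : Int) (k : Int), Dom_divide_into_groups n k → Pre_divide_into_groups n k → Spec_divide_into_groups n k (divide_into_groups n k)

-- ===== LEMMAS AND PROOFS =====

-- The loop invariant: after the first j iterations, A's dict holds exactly B's
-- closed-form entries for indices 0..j-1 and A's start_num equals j*q + min j r.
theorem dig_fold_inv (q r : Int) (hr : 0 ≤ r) (j : Nat) :
    ((PySem.List.pyRange 0 (j : Int) 1).foldl
      (fun (st : PySem.Dict Int (List Int) × Int) i =>
        let e := if i < r then st.2 + q + 1 else st.2 + q
        (st.1.insert i (PySem.List.pyRange st.2 e 1), e))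
      (PySem.Dict.empty, 0)).1.items
      = (PySem.List.pyRange 0 (j : Int) 1).map (fun i =>
          let s := i * q + min i r
          (i, PySem.List.pyRange s (s + q + (if i < r then 1 else 0)) 1))
    ∧ ((PySem.List.pyRange 0 (j : Int) 1).foldl
      (fun (st : PySem.Dict Int (List Int) × Int) i =>
        let e := if i < r then st.2 + q + 1 else st.2 + q
        (st.1.insert i (PySem.List.pyRange st.2 e 1), e))
      (PySem.Dict.empty, 0)).2 = (j : Int) * q + min (j : Int) r := by
  induction j with
  | zero =>
    constructor
    · simp [PySem.List.pyRange_one_eq_nil, PySem.Dict.empty]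
    · simp [PySem.List.pyRange_one_eq_nil]
      omega
  | succ j ih =>
    obtain ⟨ih1, ih2⟩ := ih
    have hsplit : PySem.List.pyRange 0 ((j + 1 : Nat) : Int) 1
        = PySem.List.pyRange 0 (j : Int) 1 ++ [(j : Int)] := by
      have h0j : (0 : Int) ≤ (j : Int) := Int.natCast_nonneg j
      have := PySem.List.pyRange_one_succ_right h0j
      push_cast
      push_cast at this
      exact this
    rw [hsplit, List.foldl_append, List.map_append]
    set F := (fun (st : PySem.Dict Int (List Int) × Int) i =>
        let e := if i < r then st.2 + q + 1 else st.2 + q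
        (st.1.insert i (PySem.List.pyRange st.2 e 1), e)) with hF
    set st := (PySem.List.pyRange 0 (j : Int) 1).foldl F (PySem.Dict.empty, 0) with hst
    have hnotmem : st.1.contains (j : Int) = false := by
      rw [PySem.Dict.contains_eq_decide_mem_keys]
      have hkeys : st.1.keys = ((PySem.List.pyRange 0 (j : Int) 1).map (fun i =>
          let s := i * q + min i r
          (i, PySem.List.pyRange s (s + q + (if i < r then 1 else 0)) 1))).map (·.1) := by
        simp only [PySem.Dict.keys, ih1]
      rw [hkeys]
      simp only [List.map_map, decide_eq_false_iff_not]
      intro hmem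
      simp only [List.mem_map] at hmem
      obtain ⟨x, hx, hx2⟩ := hmem
      rw [PySem.List.mem_pyRange_one] at hx
      simp only [Function.comp] at hx2
      omega
    have hstep : List.foldl F st [(j : Int)] = F st (j : Int) := rfl
    rw [hstep, hF]
    simp only
    constructor
    · rw [PySem.Dict.items_insert_of_not_contains _ _ hnotmem, ih1]
      congr 1
      rw [ih2]
      congr 2
      split_ifs <;> congr 1 <;> ring
    · rw [ih2]
      push_cast
      have hq : ((j : Int) + 1) * q = (j : Int) * q + q := by ring
      rw [hq]
      generalize (j : Int) * q = a
      split_ifs with h <;> omega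

-- ===== VERDICT (by name: the statement is the Claim_ definition above) =====
theorem divide_into_groups_spec : Claim_equal_divide_into_groups := by
  intro n k _ hk
  unfold Spec_divide_into_groups divide_into_groups divide_into_groups_alt
  simp only
  have hcase : k ≤ 0 ∨ 0 < k := by omega
  rcases hcase with hk0 | hk0
  · rw [PySem.List.pyRange_one_eq_nil hk0]
    simp [PySem.Dict.empty]
  · have hr : 0 ≤ PySem.Int.mod n k := PySem.Int.mod_nonneg n hk0
    have hkn : ((k.toNat : Nat) : Int) = k := Int.toNat_of_nonneg (le_of_lt hk0)
    have := (dig_fold_inv (PySem.Int.floordiv n k) (PySem.Int.mod n k) hr k.toNat).1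
    rw [hkn] at this
    exact this
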